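-- pv_equiv track=rewrite | github.com/robertlupo1997/ferroml | scripts/check_debug_macros.py | is_test_context
-- ===== SOURCE A (Python) =====
-- from typing import List, Tuple
--
-- def is_test_context(line: str, lines: List[str], line_num: int) -> bool:
--     """Check if the line is within a test context."""
--     # Check if line itself has #[test] or #[cfg(test)]
--     if '#[test]' in line or '#[cfg(test)]' in line:
--         return True
--
--     # Look backwards for test attributes or test module
--     for i in range(max(0, line_num - 20), line_num):
--         prev_line = lines[i]
--         if '#[cfg(test)]' in prev_line:
--             return True
--         if 'mod tests' in prev_line or 'mod test' in prev_line:
--             return True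
--         if '#[test]' in prev_line:
--             return True
--
--     return False
-- ===== SOURCE B (Python) =====
-- def is_test_context(line, lines, line_num):
--     """Check if the line is within a test context."""
--     if '#[test]' in line or '#[cfg(test)]' in line:
--         return True
--     # One substring search over the joined backward window instead of a per-line loop.
--     lo = max(0, line_num - 20)
--     hi = max(0, line_num)
--     blob = '\n'.join(lines[lo:hi])
--     return '#[cfg(test)]' in blob or 'mod test' in blob or '#[test]' in blob
-- ===== Notes on version B (the rewrite author's own statement) =====
-- stated objective: idiomatic
-- what changed: B replaces A's per-line backward loop with its three early-return if-chains by one clamped slice of the window joined into a single blob and three substring searches over it ('mod tests' being subsumed by 'mod test').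
import Mathlib
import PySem

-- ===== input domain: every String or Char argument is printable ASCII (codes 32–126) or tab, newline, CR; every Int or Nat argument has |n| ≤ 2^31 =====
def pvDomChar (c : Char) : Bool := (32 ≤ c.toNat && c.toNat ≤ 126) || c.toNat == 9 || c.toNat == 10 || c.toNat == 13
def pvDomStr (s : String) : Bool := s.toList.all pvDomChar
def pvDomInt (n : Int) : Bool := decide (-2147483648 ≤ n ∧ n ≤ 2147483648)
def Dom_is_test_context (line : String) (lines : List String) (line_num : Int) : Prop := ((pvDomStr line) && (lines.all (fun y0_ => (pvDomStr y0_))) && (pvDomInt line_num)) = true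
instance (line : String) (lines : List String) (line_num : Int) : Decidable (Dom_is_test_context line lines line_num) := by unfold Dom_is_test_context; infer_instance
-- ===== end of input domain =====

-- B replaces A's per-line backward loop (three early-return checks per line) by one clamped
-- slice joined into a single blob and three substring searches over it (objective: idiomatic).

-- ===== PORT A =====
def is_test_context (line : String) (lines : List String) (line_num : Int) : Bool :=
  if PySem.Str.isIn "#[test]" line || PySem.Str.isIn "#[cfg(test)]" line then true
  else
    -- 'for i in range(max(0, line_num-20), line_num): … return True … / return False' as .any;
    -- lines[i] is pyGet?; the 'none' (IndexError) case is excluded by Pre_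
    (PySem.List.pyRange (max 0 (line_num - 20)) line_num).any (fun i =>
      match PySem.List.pyGet? lines i with
      | none => false
      | some prev_line =>
        if PySem.Str.isIn "#[cfg(test)]" prev_line then true
        else if PySem.Str.isIn "mod tests" prev_line || PySem.Str.isIn "mod test" prev_line then true
        else if PySem.Str.isIn "#[test]" prev_line then true
        else false)

-- ===== PORT B =====
def is_test_context_alt (line : String) (lines : List String) (line_num : Int) : Bool :=
  if PySem.Str.isIn "#[test]" line || PySem.Str.isIn "#[cfg(test)]" line then true
  else
    let blob := PySem.Str.join "\n"
      (PySem.List.slice lines (some (max 0 (line_num - 20))) (some (max 0 line_num)))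
    PySem.Str.isIn "#[cfg(test)]" blob || PySem.Str.isIn "mod test" blob || PySem.Str.isIn "#[test]" blob

-- ===== PRECONDITION & SPEC =====
-- does this window line carry one of A's test markers? ('mod tests' is subsumed by 'mod test')
def pvHasMarker (p : String) : Bool :=
  PySem.Str.isIn "#[cfg(test)]" p || PySem.Str.isIn "mod test" p || PySem.Str.isIn "#[test]" p

-- Pre_ admits exactly the inputs on which Python A returns: either line_num stays within the
-- list (no index is out of range), or A returns True early — a marker in `line` itself, or a
-- marker in some in-range backward-window line reached before the first out-of-range index.
-- Outside Pre_ A raises IndexError.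
def Pre_is_test_context (line : String) (lines : List String) (line_num : Int) : Prop :=
  line_num ≤ (lines.length : Int)
  ∨ (PySem.Str.isIn "#[test]" line || PySem.Str.isIn "#[cfg(test)]" line) = true
  ∨ (lines.drop (max 0 (line_num - 20)).toNat).any pvHasMarker = true
instance (line : String) (lines : List String) (line_num : Int) : Decidable (Pre_is_test_context line lines line_num) := by unfold Pre_is_test_context; infer_instance

def pvWitness_is_test_context : String × List String × Int := ("fn foo()", ["mod tests {", "    #[test]"], 2)

def Spec_is_test_context (line : String) (lines : List String) (line_num : Int) (out : Bool) : Prop := out = is_test_context_alt line lines line_num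
instance (line : String) (lines : List String) (line_num : Int) (out : Bool) : Decidable (Spec_is_test_context line lines line_num out) := by unfold Spec_is_test_context; infer_instance

-- ===== CLAIM (what is proved, stated in full; the proofs are below) =====
def Claim_equal_is_test_context : Prop := ∀ (line : String) (lines : List String) (line_num : Int), Dom_is_test_context line lines line_num → Pre_is_test_context line lines line_num → Spec_is_test_context line lines line_num (is_test_context line lines line_num)

-- ===== LEMMAS AND PROOFS =====

-- an occurrence of cs in u ++ sep :: v cannot cross the separator when sep ∉ cs
lemma infix_sep_append (cs u v : List Char) (sep : Char) (hsep : sep ∉ cs) :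
    cs <:+: u ++ sep :: v ↔ cs <:+: u ∨ cs <:+: v := by
  constructor
  · rintro ⟨s, t, h⟩
    rw [List.append_assoc] at h
    rcases List.append_eq_append_iff.mp h with ⟨a', ha, hb⟩ | ⟨c', hc, hd⟩
    · rcases List.append_eq_append_iff.mp hb with ⟨b', hab, _⟩ | ⟨c'', hcs, hsv⟩
      · exact Or.inl ⟨s, b', by rw [ha, hab]; simp⟩
      · cases c'' with
        | nil => exact Or.inl ⟨s, [], by rw [ha, hcs]; simp⟩
        | cons x xs =>
          exfalso
          have hx : x = sep := by
            have := hsv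
            simp only [List.cons_append] at this
            exact (List.cons.injEq _ _ _ _ ▸ this).1.symm
          exact hsep (by rw [hcs, hx]; exact List.mem_append_right _ (List.mem_cons_self))
    · cases c' with
      | nil =>
        simp only [List.nil_append] at hd
        cases cs with
        | nil => exact Or.inl List.nil_infix
        | cons y ys =>
          exfalso
          have hy : sep = y := by
            simp only [List.cons_append] at hd
            exact (List.cons.injEq _ _ _ _ ▸ hd).1
          exact hsep (hy ▸ List.mem_cons_self)
      | cons x xs =>
        have hx : sep = x ∧ v = xs ++ (cs ++ t) := by
          simp only [List.cons_append] at hd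
          exact ⟨(List.cons.injEq _ _ _ _ ▸ hd).1, (List.cons.injEq _ _ _ _ ▸ hd).2⟩
        exact Or.inr ⟨xs, t, by rw [hx.2]; simp⟩
  · rintro (h | ⟨s, t, ht⟩)
    · exact List.infix_append_of_infix_left h
    · exact ⟨u ++ sep :: s, t, by rw [← ht]; simp⟩

lemma infix_join (cs : List Char) (hne : cs ≠ []) (hnl : '\n' ∉ cs) :
    ∀ ps : List (List Char), (cs <:+: PySem.Chars.join ['\n'] ps ↔ ∃ p ∈ ps, cs <:+: p) := by
  intro ps
  induction ps with
  | nil => simp [PySem.Chars.join_nil, List.infix_nil, hne]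
  | cons p rest ih =>
    cases rest with
    | nil => simp [PySem.Chars.join_singleton]
    | cons q rs =>
      rw [PySem.Chars.join_cons_cons, List.append_assoc, List.singleton_append,
        infix_sep_append cs p _ '\n' hnl]
      constructor
      · rintro (h | h)
        · exact ⟨p, by simp, h⟩
        · rcases ih.mp h with ⟨r, hr, hcr⟩
          exact ⟨r, by simp [hr], hcr⟩
      · rintro ⟨r, hr, hcr⟩
        rcases List.mem_cons.mp hr with rfl | hr'
        · exact Or.inl hcr
        · exact Or.inr (ih.mpr ⟨r, hr', hcr⟩)

lemma isIn_join_any (m : String) (hne : m.toList ≠ []) (hnl : '\n' ∉ m.toList) (ps : List String) :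
    PySem.Str.isIn m (PySem.Str.join "\n" ps) = ps.any (fun p => PySem.Str.isIn m p) := by
  rw [Bool.eq_iff_iff]
  simp only [List.any_eq_true, PySem.Str.isIn_iff_infix, PySem.Str.toList_join]
  have hsep : ("\n" : String).toList = ['\n'] := rfl
  rw [hsep, infix_join m.toList hne hnl]
  simp

-- 'mod tests' in p implies 'mod test' in p, so the disjunction collapses
lemma mod_subsume (p : String) :
    (PySem.Str.isIn "mod tests" p || PySem.Str.isIn "mod test" p) = PySem.Str.isIn "mod test" p := by
  by_cases h : PySem.Str.isIn "mod tests" p = true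
  · have h2 : PySem.Str.isIn "mod test" p = true := by
      rw [PySem.Str.isIn_iff_infix] at h ⊢
      exact List.IsInfix.trans (by decide : ("mod test").toList <:+: ("mod tests").toList) h
    rw [h, h2]
    rfl
  · simp only [Bool.not_eq_true] at h
    rw [h, Bool.false_or]

-- A's index loop over the window (out-of-range lookups contributing false) equals the same
-- predicate over the clamped sliced window
lemma any_window (lines : List String) (n : Int) (f : String → Bool) :
    ((PySem.List.pyRange (max 0 (n - 20)) n).any (fun i =>
        match PySem.List.pyGet? lines i with
        | none => false
        | some p => f p))
      = (List.take (n.toNat - (max 0 (n - 20)).toNat) (List.drop (max 0 (n - 20)).toNat lines)).any f := by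
  rw [Bool.eq_iff_iff]
  simp only [List.any_eq_true]
  constructor
  · rintro ⟨i, hi, hf⟩
    rw [PySem.List.mem_pyRange_one] at hi
    have h0 : (0 : Int) ≤ i := le_trans (le_max_left 0 _) hi.1
    obtain ⟨k, rfl⟩ := Int.eq_ofNat_of_zero_le h0
    rw [PySem.List.pyGet?_natCast] at hf
    by_cases hlt : k < lines.length
    · rw [List.getElem?_eq_getElem hlt] at hf
      refine ⟨lines[k], ?_, hf⟩
      rw [List.mem_iff_getElem]
      refine ⟨k - (max 0 (n - 20)).toNat, ?_, ?_⟩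
      · have h1 : (max 0 (n - 20)).toNat ≤ k := by
          have := hi.1; omega
        have h2 : k < n.toNat := by
          have := hi.2; omega
        simp only [List.length_take, List.length_drop]
        omega
      · simp only [List.getElem_take, List.getElem_drop]
        have hk : (max 0 (n - 20)).toNat + (k - (max 0 (n - 20)).toNat) = k := by
          have := hi.1; omega
        simp only [hk]
    · rw [List.getElem?_eq_none (by omega)] at hf
      exact absurd hf (by simp)
  · rintro ⟨p, hp, hf⟩
    rw [List.mem_iff_getElem] at hp
    obtain ⟨j, hj, rfl⟩ := hp
    have hj' : j < n.toNat - (max 0 (n - 20)).toNat ∧ (max 0 (n - 20)).toNat + j < lines.length := by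
      simp only [List.length_take, List.length_drop] at hj
      omega
    refine ⟨(((max 0 (n - 20)).toNat + j : Nat) : Int), ?_, ?_⟩
    · rw [PySem.List.mem_pyRange_one]
      constructor <;> omega
    · rw [PySem.List.pyGet?_natCast, List.getElem?_eq_getElem hj'.2]
      have he : (List.take (n.toNat - (max 0 (n - 20)).toNat) (List.drop (max 0 (n - 20)).toNat lines))[j] = lines[(max 0 (n - 20)).toNat + j] := by
        simp only [List.getElem_take, List.getElem_drop]
      rw [he] at hf
      exact hf

lemma any_or_distrib (l : List String) (f g : String → Bool) :
    (l.any fun p => f p || g p) = (l.any f || l.any g) := by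
  rw [Bool.eq_iff_iff]
  simp only [List.any_eq_true, Bool.or_eq_true]
  constructor
  · rintro ⟨p, hp, h | h⟩
    · exact Or.inl ⟨p, hp, h⟩
    · exact Or.inr ⟨p, hp, h⟩
  · rintro (⟨p, hp, h⟩ | ⟨p, hp, h⟩)
    · exact ⟨p, hp, Or.inl h⟩
    · exact ⟨p, hp, Or.inr h⟩

-- ===== VERDICT (by name: the statement is the Claim_ definition above) =====
theorem is_test_context_spec : Claim_equal_is_test_context := by
  intro line lines n _hdom _hpre
  unfold Spec_is_test_context is_test_context is_test_context_alt
  by_cases hl : (PySem.Str.isIn "#[test]" line || PySem.Str.isIn "#[cfg(test)]" line) = true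
  · simp only [hl, if_true]
  · rw [if_neg hl, if_neg hl]
    have hslice : PySem.List.slice lines (some (max 0 (n - 20))) (some (max 0 n))
        = List.take (n.toNat - (max 0 (n - 20)).toNat) (List.drop (max 0 (n - 20)).toNat lines) := by
      rw [PySem.List.slice_toNat lines (le_max_left 0 _) (le_max_left 0 _)]
      congr 1
      omega
    simp only [hslice]
    rw [isIn_join_any _ (by decide) (by decide), isIn_join_any _ (by decide) (by decide),
      isIn_join_any _ (by decide) (by decide)]
    rw [any_window lines n]
    generalize (List.take (n.toNat - (max 0 (n - 20)).toNat) (List.drop (max 0 (n - 20)).toNat lines)) = W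
    -- collapse A's per-line if-chain to a disjunction of the three kept markers
    have hbody : ∀ p : String,
        (if PySem.Str.isIn "#[cfg(test)]" p then true
         else if PySem.Str.isIn "mod tests" p || PySem.Str.isIn "mod test" p then true
         else if PySem.Str.isIn "#[test]" p then true else false)
        = (PySem.Str.isIn "#[cfg(test)]" p || (PySem.Str.isIn "mod test" p || PySem.Str.isIn "#[test]" p)) := by
      intro p
      rw [show (PySem.Str.isIn "mod tests" p || PySem.Str.isIn "mod test" p) = PySem.Str.isIn "mod test" p from mod_subsume p]
      cases h1 : PySem.Str.isIn "#[cfg(test)]" p <;>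
        cases h2 : PySem.Str.isIn "mod test" p <;>
          cases h3 : PySem.Str.isIn "#[test]" p <;> simp
    calc W.any _ = W.any (fun p => PySem.Str.isIn "#[cfg(test)]" p || (PySem.Str.isIn "mod test" p || PySem.Str.isIn "#[test]" p)) := by
            exact congrArg _ (funext hbody)
      _ = _ := by
            rw [any_or_distrib, any_or_distrib, Bool.or_assoc]
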